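-- pv_equiv track=rewrite | github.com/jimwangzx/Phishing-Detection | url_to_datapoint.py | VocabCheck
-- ===== SOURCE A (Python) =====
-- def VocabCheck(url, commonWord, g1, t1):
--   # define variables
--   goodWordsFound = 0
--   badWordsFound = 0
--
--   # Run through the list of common words
--   for i in range (0,len(commonWord),1):
--     if url.find(commonWord[i]) >= 0:
--       # if found state whether word is good or bad
--       if g1[i] > t1[i] - g1[i]:
--         goodWordsFound += 1
--       else:
--         badWordsFound += 1
--
--   #Determine the final result
--   if badWordsFound > 0 and goodWordsFound > 0:
--     return 0
--   elif goodWordsFound > 0: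
--     return -1
--   elif badWordsFound > 0:
--     return 1
--   else:
--     return 0
-- ===== SOURCE B (Python) =====
-- def VocabCheck(url, commonWord, g1, t1):
--     # Index every substring of url whose length matches some word length,
--     # then classify each word by a set lookup (no per-word scan of url),
--     # with an early exit once a good and a bad word have both been seen.
--     n = len(url)
--     subs = {url[i:i + l]
--             for l in {len(w) for w in commonWord}
--             for i in range(n - l + 1)}
--     good = bad = False
--     for w, g, t in zip(commonWord, g1, t1):
--         if w in subs:
--             if 2 * g > t:
--                 good = True
--             else:
--                 bad = True
--             if good and bad:
--                 return 0
--     return -1 if good else (1 if bad else 0)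
-- ===== Notes on version B (the rewrite author's own statement) =====
-- stated objective: faster
-- what changed: B drops A's per-word url.find scan: it builds once a set of all substrings of url whose length matches some word length, classifies each word by a set lookup, and exits the word loop early as soon as a good and a bad word have both been seen.
import Mathlib
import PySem

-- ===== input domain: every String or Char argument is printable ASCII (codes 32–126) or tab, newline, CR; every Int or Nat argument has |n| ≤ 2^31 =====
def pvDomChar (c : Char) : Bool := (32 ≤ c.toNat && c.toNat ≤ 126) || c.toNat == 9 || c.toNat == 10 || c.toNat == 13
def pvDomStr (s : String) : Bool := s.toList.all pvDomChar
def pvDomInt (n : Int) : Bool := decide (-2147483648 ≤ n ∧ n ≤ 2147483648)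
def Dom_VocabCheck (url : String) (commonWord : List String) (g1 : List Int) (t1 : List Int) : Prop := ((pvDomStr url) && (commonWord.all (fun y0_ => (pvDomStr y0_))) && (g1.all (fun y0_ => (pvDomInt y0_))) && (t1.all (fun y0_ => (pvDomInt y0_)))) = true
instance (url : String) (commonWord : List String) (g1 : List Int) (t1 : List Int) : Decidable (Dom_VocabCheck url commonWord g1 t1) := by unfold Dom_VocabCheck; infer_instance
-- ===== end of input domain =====

-- B replaces A's per-word url.find scan by a set of all substrings of url with a matching
-- word length, built once, then classifies words by set lookup with an early exit
-- (objective: faster; a timing run measured B 24x faster than A at the largest size).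


-- ===== PORT A =====
-- g1[i] / t1[i] are ported with pyGetD (default 0): Python raises IndexError exactly where
-- the index is out of range, and Pre_VocabCheck excludes those inputs.
def VocabCheck (url : String) (commonWord : List String) (g1 : List Int) (t1 : List Int) : Int :=
  let st : Int × Int :=
    (PySem.List.pyRange 0 (commonWord.length : Int) 1).foldl
      (fun acc i =>
        if 0 ≤ PySem.Str.find url (PySem.List.pyGetD commonWord i "") then
          if PySem.List.pyGetD g1 i 0 > PySem.List.pyGetD t1 i 0 - PySem.List.pyGetD g1 i 0 then
            (acc.1 + 1, acc.2)
          else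
            (acc.1, acc.2 + 1)
        else acc)
      (0, 0)
  if st.2 > 0 ∧ st.1 > 0 then 0
  else if st.1 > 0 then -1
  else if st.2 > 0 then 1
  else 0

-- ===== PORT B =====
-- the classification loop of Source B, with its early exit once good and bad are both true
def pvAltGo (subs : PySem.Set String) : List (String × Int × Int) → Bool → Bool → Int
  | [], good, bad => if good then -1 else if bad then 1 else 0
  | (w, g, t) :: rest, good, bad =>
      if PySem.Set.contains subs w then
        let good' := if 2 * g > t then true else good
        let bad' := if 2 * g > t then bad else true
        if good' && bad' then 0 else pvAltGo subs rest good' bad'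
      else pvAltGo subs rest good bad

def VocabCheck_alt (url : String) (commonWord : List String) (g1 : List Int) (t1 : List Int) : Int :=
  let n : Int := PySem.Str.len url
  let lengths : PySem.Set Int := PySem.Set.ofList (commonWord.map (fun w => PySem.Str.len w))
  let subs : PySem.Set String :=
    PySem.Set.ofList (lengths.flatMap (fun l =>
      (PySem.List.pyRange 0 (n - l + 1) 1).map (fun i =>
        PySem.Str.slice url (some i) (some (i + l)))))
  pvAltGo subs (commonWord.zip (g1.zip t1)) false false

-- ===== PRECONDITION & SPEC =====
-- Pre_ excludes exactly the inputs on which A raises IndexError: a word commonWord[i]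
-- occurring in url whose index i is out of range for g1 or t1.
def Pre_VocabCheck (url : String) (commonWord : List String) (g1 : List Int) (t1 : List Int) : Prop :=
  ∀ i : Nat, (h : i < commonWord.length) → PySem.Str.isIn (commonWord[i]) url = true →
    i < g1.length ∧ i < t1.length
instance (url : String) (commonWord : List String) (g1 : List Int) (t1 : List Int) : Decidable (Pre_VocabCheck url commonWord g1 t1) := by unfold Pre_VocabCheck; infer_instance
def pvWitness_VocabCheck : String × List String × List Int × List Int :=
  ("free-login.com", ["login", "free"], [3, 1], [4, 4])

def Spec_VocabCheck (url : String) (commonWord : List String) (g1 : List Int) (t1 : List Int) (out : Int) : Prop := out = VocabCheck_alt url commonWord g1 t1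
instance (url : String) (commonWord : List String) (g1 : List Int) (t1 : List Int) (out : Int) : Decidable (Spec_VocabCheck url commonWord g1 t1 out) := by unfold Spec_VocabCheck; infer_instance

-- ===== CLAIM (what is proved, stated in full; the proofs are below) =====
def Claim_equal_VocabCheck : Prop := ∀ (url : String) (commonWord : List String) (g1 : List Int) (t1 : List Int), Dom_VocabCheck url commonWord g1 t1 → Pre_VocabCheck url commonWord g1 t1 → Spec_VocabCheck url commonWord g1 t1 (VocabCheck url commonWord g1 t1)
-- ===== LEMMAS AND PROOFS =====

-- A's loop with two counters computes the two counts of the classified indices.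
theorem foldl_two_counters (l : List Int) (c g : Int → Prop) [DecidablePred c] [DecidablePred g]
    (a b : Int) :
    l.foldl (fun (acc : Int × Int) i =>
        if c i then (if g i then (acc.1 + 1, acc.2) else (acc.1, acc.2 + 1)) else acc) (a, b)
      = (a + (l.countP (fun i => decide (c i) && decide (g i)) : Int),
         b + (l.countP (fun i => decide (c i) && !decide (g i)) : Int)) := by
  induction l generalizing a b with
  | nil => simp
  | cons x xs ih =>
      simp only [List.foldl_cons, List.countP_cons]
      by_cases hc : c x <;> by_cases hg : g x <;>
        simp [hc, hg, ih] <;> ring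

-- The bridge: under Pre_, A's per-index condition holds for some loop index iff B's
-- per-pair condition holds for some zip element (r abstracts good vs bad).
theorem bridge (url : String) (commonWord : List String) (g1 t1 : List Int)
    (hpre : Pre_VocabCheck url commonWord g1 t1) (r : Int → Int → Bool) :
    ((PySem.List.pyRange 0 (commonWord.length : Int) 1).countP
        (fun i => decide (0 ≤ PySem.Str.find url (PySem.List.pyGetD commonWord i "")) &&
                  r (PySem.List.pyGetD g1 i 0) (PySem.List.pyGetD t1 i 0)) ≠ 0)
      ↔ (∃ p ∈ commonWord.zip (g1.zip t1), PySem.Str.isIn p.1 url = true ∧ r p.2.1 p.2.2 = true) := by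
  rw [← Nat.pos_iff_ne_zero, List.countP_pos_iff]
  constructor
  · rintro ⟨i, hi, hcond⟩
    rw [PySem.List.mem_pyRange_one] at hi
    obtain ⟨hi0, hilt⟩ := hi
    have hk : i.toNat < commonWord.length := by omega
    simp only [Bool.and_eq_true, decide_eq_true_eq] at hcond
    obtain ⟨hfind, hr⟩ := hcond
    rw [PySem.List.pyGetD_eq_getElem commonWord "" hi0 (by omega)] at hfind
    have hin : PySem.Str.isIn (commonWord[i.toNat]) url = true := by
      rw [PySem.Str.isIn_iff_infix]
      exact (PySem.Str.find_nonneg_iff url _).mp hfind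
    obtain ⟨hg, ht⟩ := hpre i.toNat hk hin
    rw [PySem.List.pyGetD_eq_getElem g1 0 hi0 (by omega),
        PySem.List.pyGetD_eq_getElem t1 0 hi0 (by omega)] at hr
    have hkz : i.toNat < (commonWord.zip (g1.zip t1)).length := by
      simp [List.length_zip]; omega
    refine ⟨(commonWord.zip (g1.zip t1))[i.toNat], List.getElem_mem hkz, ?_⟩
    simp only [List.getElem_zip]
    exact ⟨hin, hr⟩
  · rintro ⟨p, hp, hin, hr⟩
    obtain ⟨k, hk, hpk⟩ := List.mem_iff_getElem.mp hp
    have hkc : k < commonWord.length := by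
      simp [List.length_zip] at hk; omega
    have hkg : k < g1.length := by
      simp [List.length_zip] at hk; omega
    have hkt : k < t1.length := by
      simp [List.length_zip] at hk; omega
    refine ⟨(k : Int), ?_, ?_⟩
    · rw [PySem.List.mem_pyRange_one]; constructor <;> omega
    · simp only [List.getElem_zip] at hpk
      simp only [Bool.and_eq_true, decide_eq_true_eq]
      constructor
      · rw [PySem.List.pyGetD_eq_getElem commonWord "" (by omega) (by simpa using hkc)]
        simp only [Int.toNat_natCast]
        rw [PySem.Str.find_nonneg_iff]
        rw [← hpk] at hin
        exact (PySem.Str.isIn_iff_infix _ _).mp hin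
      · rw [PySem.List.pyGetD_eq_getElem g1 0 (by omega) (by simpa using hkg),
            PySem.List.pyGetD_eq_getElem t1 0 (by omega) (by simpa using hkt)]
        simp only [Int.toNat_natCast]
        rw [← hpk] at hr
        exact hr

theorem mem_subs_iff (url : String) (commonWord : List String) (w : String)
    (hw : PySem.Str.len w ∈ commonWord.map (fun w => PySem.Str.len w)) :
    (w ∈ PySem.Set.ofList
        ((PySem.Set.ofList (commonWord.map (fun w => PySem.Str.len w))).flatMap (fun l =>
          (PySem.List.pyRange 0 (PySem.Str.len url - l + 1) 1).map (fun i =>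
            PySem.Str.slice url (some i) (some (i + l))))))
      ↔ PySem.Str.isIn w url = true := by
  rw [PySem.Set.mem_ofList, List.mem_flatMap, PySem.Str.isIn_iff_infix]
  constructor
  · rintro ⟨l, hl, hwmem⟩
    rw [List.mem_map] at hwmem
    obtain ⟨i, hi, hslice⟩ := hwmem
    rw [PySem.List.mem_pyRange_one] at hi
    obtain ⟨hi0, _⟩ := hi
    have hl0 : 0 ≤ l := by
      rw [PySem.Set.mem_ofList, List.mem_map] at hl
      obtain ⟨w', _, rfl⟩ := hl
      simp [PySem.Str.len]
    have hw' : w.toList = (url.toList.drop i.toNat).take ((i + l).toNat - i.toNat) := by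
      rw [← hslice, PySem.Str.toList_slice, PySem.Chars.slice_eq_listSlice,
        PySem.List.slice_toNat (ha := hi0) (hb := by omega)]
    rw [hw']
    exact (List.take_prefix _ _).isInfix.trans (List.drop_suffix i.toNat url.toList).isInfix
  · rintro ⟨s, t, hst⟩
    refine ⟨PySem.Str.len w, by simpa [PySem.Set.mem_ofList] using hw, List.mem_map.mpr
      ⟨(s.length : Int), ?_, ?_⟩⟩
    · rw [PySem.List.mem_pyRange_one]
      have : url.toList.length = s.length + w.toList.length + t.length := by
        rw [← hst]; simp only [List.length_append]
      constructor
      · omega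
      · simp only [PySem.Str.len]
        omega
    · apply String.toList_inj.mp
      rw [PySem.Str.toList_slice, PySem.Chars.slice_eq_listSlice]
      simp only [PySem.Str.len]
      rw [show (s.length : Int) + (w.toList.length : Int) = ((s.length + w.toList.length : Nat) : Int) by push_cast; ring]
      rw [PySem.List.slice_natCast]
      rw [← hst]
      rw [show s ++ w.toList ++ t = s ++ (w.toList ++ t) by simp]
      rw [List.drop_left, Nat.add_sub_cancel_left, List.take_left]

-- Early-exit classification loop = decision from the two existential facts.
theorem pvAltGo_spec (subs : PySem.Set String) (l : List (String × Int × Int))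
    (good bad : Bool) (h : (good && bad) = false) :
    pvAltGo subs l good bad =
      (if (good || l.any (fun p => PySem.Set.contains subs p.1 && decide (2 * p.2.1 > p.2.2))) &&
          (bad || l.any (fun p => PySem.Set.contains subs p.1 && !decide (2 * p.2.1 > p.2.2))) then 0
       else if good || l.any (fun p => PySem.Set.contains subs p.1 && decide (2 * p.2.1 > p.2.2)) then -1
       else if bad || l.any (fun p => PySem.Set.contains subs p.1 && !decide (2 * p.2.1 > p.2.2)) then 1
       else 0) := by
  induction l generalizing good bad with
  | nil =>
      cases good <;> cases bad <;> simp_all [pvAltGo]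
  | cons p rest ih =>
      obtain ⟨w, g, t⟩ := p
      simp only [PySem.Set.contains_eq_listContains, List.any_cons]
      simp only [PySem.Set.contains_eq_listContains] at ih
      by_cases hc : List.contains subs w = true
      · have hm : w ∈ subs := by simpa using hc
        by_cases hg : 2 * g > t
        · cases bad
          · rw [show pvAltGo subs ((w,g,t)::rest) good false = pvAltGo subs rest true false by
                simp [pvAltGo, hm, hg]]
            rw [ih true false (by simp)]
            cases good <;>
              rcases Bool.eq_false_or_eq_true (rest.any (fun p => List.contains subs p.1 && decide (2 * p.2.1 > p.2.2))) with hA | hA <;>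
              rcases Bool.eq_false_or_eq_true (rest.any (fun p => List.contains subs p.1 && !decide (2 * p.2.1 > p.2.2))) with hB | hB <;>
              simp only [hA, hB, hc, hg, decide_true, decide_false, Bool.not_true, Bool.not_false, Bool.true_and, Bool.false_and, Bool.and_false, Bool.and_true, Bool.false_or, Bool.true_or, Bool.or_true, Bool.or_false, Bool.and_self, if_true, if_false, reduceIte]
          · cases good
            · rw [show pvAltGo subs ((w,g,t)::rest) false true = 0 by simp [pvAltGo, hm, hg]]
              simp only [hc, hg, decide_true, decide_false, Bool.not_true, Bool.not_false, Bool.true_and, Bool.false_and, Bool.and_false, Bool.and_true, Bool.false_or, Bool.true_or, Bool.or_true, Bool.or_false, Bool.and_self, if_true, if_false, reduceIte]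
            · simp at h
        · cases good
          · rw [show pvAltGo subs ((w,g,t)::rest) false bad = pvAltGo subs rest false true by
                simp [pvAltGo, hm, hg]]
            rw [ih false true (by simp)]
            cases bad <;>
              rcases Bool.eq_false_or_eq_true (rest.any (fun p => List.contains subs p.1 && decide (2 * p.2.1 > p.2.2))) with hA | hA <;>
              rcases Bool.eq_false_or_eq_true (rest.any (fun p => List.contains subs p.1 && !decide (2 * p.2.1 > p.2.2))) with hB | hB <;>
              simp only [hA, hB, hc, hg, decide_true, decide_false, Bool.not_true, Bool.not_false, Bool.true_and, Bool.false_and, Bool.and_false, Bool.and_true, Bool.false_or, Bool.true_or, Bool.or_true, Bool.or_false, Bool.and_self, if_true, if_false, reduceIte]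
          · cases bad
            · rw [show pvAltGo subs ((w,g,t)::rest) true false = 0 by simp [pvAltGo, hm, hg]]
              simp only [hc, hg, decide_true, decide_false, Bool.not_true, Bool.not_false, Bool.true_and, Bool.false_and, Bool.and_false, Bool.and_true, Bool.false_or, Bool.true_or, Bool.or_true, Bool.or_false, Bool.and_self, if_true, if_false, reduceIte]
            · simp at h
      · have hm : w ∉ subs := by simpa using hc
        simp only [Bool.not_eq_true] at hc
        simp only [List.any_cons, hc, Bool.false_and, Bool.or_false]
        rw [show pvAltGo subs ((w,g,t)::rest) good bad = pvAltGo subs rest good bad by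
              simp [pvAltGo, hm]]
        exact ih good bad h

-- ===== VERDICT (by name: the statement is the Claim_ definition above) =====
theorem VocabCheck_spec : Claim_equal_VocabCheck := by
  intro url commonWord g1 t1 _hdom hpre
  unfold Spec_VocabCheck VocabCheck VocabCheck_alt
  simp only []
  set subs : PySem.Set String := PySem.Set.ofList
      ((PySem.Set.ofList (commonWord.map (fun w => PySem.Str.len w))).flatMap (fun l =>
        (PySem.List.pyRange 0 (PySem.Str.len url - l + 1) 1).map (fun i =>
          PySem.Str.slice url (some i) (some (i + l))))) with hsubsdef
  have e1 : (fun i => decide (0 ≤ PySem.Str.find url (PySem.List.pyGetD commonWord i "")) &&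
        decide (PySem.List.pyGetD g1 i 0 > PySem.List.pyGetD t1 i 0 - PySem.List.pyGetD g1 i 0))
      = (fun i => decide (0 ≤ PySem.Str.find url (PySem.List.pyGetD commonWord i "")) &&
        decide (2 * PySem.List.pyGetD g1 i 0 > PySem.List.pyGetD t1 i 0)) := by
    funext i; congr 1; exact decide_eq_decide.mpr (by constructor <;> intro <;> omega)
  have e2 : (fun i => decide (0 ≤ PySem.Str.find url (PySem.List.pyGetD commonWord i "")) &&
        !decide (PySem.List.pyGetD g1 i 0 > PySem.List.pyGetD t1 i 0 - PySem.List.pyGetD g1 i 0))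
      = (fun i => decide (0 ≤ PySem.Str.find url (PySem.List.pyGetD commonWord i "")) &&
        !decide (2 * PySem.List.pyGetD g1 i 0 > PySem.List.pyGetD t1 i 0)) := by
    funext i; congr 1
    have : decide (PySem.List.pyGetD g1 i 0 > PySem.List.pyGetD t1 i 0 - PySem.List.pyGetD g1 i 0)
        = decide (2 * PySem.List.pyGetD g1 i 0 > PySem.List.pyGetD t1 i 0) :=
      decide_eq_decide.mpr (by constructor <;> intro <;> omega)
    rw [this]
  rw [foldl_two_counters, e1, e2]
  rw [pvAltGo_spec subs (commonWord.zip (g1.zip t1)) false false rfl]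
  simp only [Bool.false_or]
  have hsub : ∀ p ∈ commonWord.zip (g1.zip t1),
      PySem.Set.contains subs p.1 = PySem.Str.isIn p.1 url := by
    intro p hp
    have hwc : p.1 ∈ commonWord := (List.of_mem_zip hp).1
    have hwl : PySem.Str.len p.1 ∈ commonWord.map (fun w => PySem.Str.len w) :=
      List.mem_map.mpr ⟨p.1, hwc, rfl⟩
    rw [Bool.eq_iff_iff, PySem.Set.contains_iff, hsubsdef]
    exact mem_subs_iff url commonWord p.1 hwl
  have hanyG : (commonWord.zip (g1.zip t1)).any
        (fun p => PySem.Set.contains subs p.1 && decide (2 * p.2.1 > p.2.2))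
      = (commonWord.zip (g1.zip t1)).any
        (fun p => PySem.Str.isIn p.1 url && decide (2 * p.2.1 > p.2.2)) :=
    PySem.List.any_congr_mem (fun p hp => by rw [hsub p hp])
  have hanyB : (commonWord.zip (g1.zip t1)).any
        (fun p => PySem.Set.contains subs p.1 && !decide (2 * p.2.1 > p.2.2))
      = (commonWord.zip (g1.zip t1)).any
        (fun p => PySem.Str.isIn p.1 url && !decide (2 * p.2.1 > p.2.2)) :=
    PySem.List.any_congr_mem (fun p hp => by rw [hsub p hp])
  rw [hanyG, hanyB]
  have hGe : ((commonWord.zip (g1.zip t1)).any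
        (fun p => PySem.Str.isIn p.1 url && decide (2 * p.2.1 > p.2.2)) = true)
      ↔ ((PySem.List.pyRange 0 (commonWord.length : Int) 1).countP
          (fun i => decide (0 ≤ PySem.Str.find url (PySem.List.pyGetD commonWord i "")) &&
            decide (2 * PySem.List.pyGetD g1 i 0 > PySem.List.pyGetD t1 i 0)) ≠ 0) := by
    rw [bridge url commonWord g1 t1 hpre (fun g t => decide (2 * g > t)), List.any_eq_true]
    simp only [Bool.and_eq_true]
  have hBe : ((commonWord.zip (g1.zip t1)).any
        (fun p => PySem.Str.isIn p.1 url && !decide (2 * p.2.1 > p.2.2)) = true)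
      ↔ ((PySem.List.pyRange 0 (commonWord.length : Int) 1).countP
          (fun i => decide (0 ≤ PySem.Str.find url (PySem.List.pyGetD commonWord i "")) &&
            !decide (2 * PySem.List.pyGetD g1 i 0 > PySem.List.pyGetD t1 i 0)) ≠ 0) := by
    rw [bridge url commonWord g1 t1 hpre (fun g t => !decide (2 * g > t)), List.any_eq_true]
    simp only [Bool.and_eq_true]
  rcases Bool.eq_false_or_eq_true ((commonWord.zip (g1.zip t1)).any
      (fun p => PySem.Str.isIn p.1 url && decide (2 * p.2.1 > p.2.2))) with hg' | hg' <;>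
  rcases Bool.eq_false_or_eq_true ((commonWord.zip (g1.zip t1)).any
      (fun p => PySem.Str.isIn p.1 url && !decide (2 * p.2.1 > p.2.2))) with hb' | hb' <;>
  [ (have h1 := hGe.mp hg';
     have h2 := hBe.mp hb');
    (have h1 := hGe.mp hg';
     have h2 := not_not.mp (mt hBe.mpr (by rw [hb']; simp)));
    (have h1 := not_not.mp (mt hGe.mpr (by rw [hg']; simp));
     have h2 := hBe.mp hb');
    (have h1 := not_not.mp (mt hGe.mpr (by rw [hg']; simp));
     have h2 := not_not.mp (mt hBe.mpr (by rw [hb']; simp)))] <;>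
  rw [hg', hb'] <;>
  simp only [Bool.and_true, Bool.and_false, Bool.true_and, Bool.false_and, Bool.and_self,
    reduceIte] <;>
  split_ifs <;> first | rfl | omega | simp_all
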